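-- pv_equiv track=rewrite | github.com/ensk26/algorithm-study | baekjoon/1022_2.py | solution
-- ===== SOURCE A (Python) =====
-- def solution(n, m):
--     arr = [[0 for _ in range(n)] for _ in range(m + 1)]
--     answer = 0
--
--     for i in range(1, m + 1):
--         arr[i][0] = 1
--
--     for i in range(1, n):
--         for j in range(pow(2, i), m + 1):
--             if j % 2 == 0:
--                 arr[j][i] = arr[j // 2][i - 1] + arr[j - 1][i]  # 이전 2의 배수, 이전 값 (1,2)->(2,4) (2,3)->(2,4)
--             else:
--                 arr[j][i] = arr[j - 1][i]  # 이전값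
--
--     for i in range(1, m + 1):
--         answer += arr[i][n - 1]
--     return answer
-- ===== SOURCE B (Python) =====
-- def solution(n, m):
--     # rolling 1-D column + explicit prefix-sum table instead of the 2-D DP table
--     prev = [0] + [1] * m
--     for i in range(1, n):
--         lo = 2 ** (i - 1)
--         if lo > m:
--             return 0
--         P = []
--         s = 0
--         for t in range(lo, m + 1):
--             s = s + prev[t]
--             P.append(s)
--         prev = [P[j // 2 - lo] if j // 2 >= lo else 0 for j in range(m + 1)]
--     return sum(prev[1:])
-- ===== Notes on version B (the rewrite author's own statement) =====
-- stated objective: faster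
-- what changed: Replaces the (m+1) x n 2-D DP table and its interleaved running-sum recurrence by a rolling 1-D column: each step builds an explicit prefix-sum array over the previous column from 2^(i-1) and maps it onto the new column (cur[j] = P[j//2-lo]), stopping early once 2^(i-1) > m since all later columns are zero.
import Mathlib
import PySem

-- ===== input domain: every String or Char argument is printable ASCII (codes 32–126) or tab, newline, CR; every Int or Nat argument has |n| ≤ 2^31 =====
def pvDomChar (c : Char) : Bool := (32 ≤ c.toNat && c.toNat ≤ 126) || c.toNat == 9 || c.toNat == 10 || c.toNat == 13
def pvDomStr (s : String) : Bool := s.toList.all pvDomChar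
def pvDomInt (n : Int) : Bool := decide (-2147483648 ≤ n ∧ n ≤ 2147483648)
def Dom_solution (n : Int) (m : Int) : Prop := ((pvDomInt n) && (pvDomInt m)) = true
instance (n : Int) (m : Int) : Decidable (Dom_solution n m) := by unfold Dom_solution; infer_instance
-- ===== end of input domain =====

-- B replaces A's (m+1)×n 2-D DP table by a rolling 1-D column rebuilt through an explicit
-- prefix-sum array each step, with an early exit once 2^(i-1) > m (all later columns are zero).

-- ===== PORT A =====
-- arr[j][i] read / write on the list-of-lists table (all indices A uses are nonnegative and,
-- under Pre_solution, in range — so the getD/setD defaults are never reached)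


def pyGet2 (arr : Array (Array Int)) (j i : Int) : Int :=
  (arr.getD j.toNat #[]).getD i.toNat 0

def pySet2 (arr : Array (Array Int)) (j i : Int) (v : Int) : Array (Array Int) :=
  arr.modify j.toNat (fun row => row.setIfInBounds i.toNat v)

def solution (n : Int) (m : Int) : Int :=
  let arr0 : Array (Array Int) :=
    ((PySem.List.pyRange 0 (m+1) 1).map
      (fun _ => ((PySem.List.pyRange 0 n 1).map (fun _ => (0:Int))).toArray)).toArray
  let arr1 := (PySem.List.pyRange 1 (m+1) 1).foldl (fun arr i => pySet2 arr i 0 1) arr0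
  let arr2 := (PySem.List.pyRange 1 n 1).foldl (fun arr i =>
      (PySem.List.pyRange ((2:Int)^i.toNat) (m+1) 1).foldl (fun arr j =>
        if PySem.Int.mod j 2 = 0 then
          pySet2 arr j i (pyGet2 arr (PySem.Int.floordiv j 2) (i-1) + pyGet2 arr (j-1) i)
        else
          pySet2 arr j i (pyGet2 arr (j-1) i)) arr) arr1
  (PySem.List.pyRange 1 (m+1) 1).foldl (fun answer i => answer + pyGet2 arr2 i (n-1)) 0

-- ===== PORT B =====
-- the prefix-sum loop of Source B (state: the list P under construction and the running sum s)

def bPrefix (m lo : Int) (prev : Array Int) : Array Int :=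
  ((PySem.List.pyRange lo (m+1) 1).foldl
    (fun (st : Array Int × Int) t =>
      (st.1.push (st.2 + prev.getD t.toNat 0), st.2 + prev.getD t.toNat 0))
    (#[], 0)).1

-- the list comprehension of Source B building the new column from P

def bCur (m lo : Int) (P : Array Int) : Array Int :=
  ((PySem.List.pyRange 0 (m+1) 1).map (fun j =>
    if lo ≤ PySem.Int.floordiv j 2 then
      P.getD (PySem.Int.floordiv j 2 - lo).toNat 0
    else 0)).toArray

-- Source B's 'for i in range(1, n)' loop with its early 'return 0'

def altLoop (m : Int) (prev : Array Int) (i : Int) : Nat → Int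
  | 0 => (PySem.List.slice prev.toList (some 1) none).sum
  | fuel+1 =>
    let lo : Int := (2:Int)^(i-1).toNat
    if m < lo then 0
    else altLoop m (bCur m lo (bPrefix m lo prev)) (i+1) fuel

def solution_alt (n : Int) (m : Int) : Int :=
  altLoop m (([(0:Int)] ++ PySem.List.pyRepeat [1] m).toArray) 1 (n-1).toNat

-- ===== PRECONDITION & SPEC =====
-- Pre_ excludes exactly the inputs where A raises: for n ≤ 0 with m ≥ 1 the table's rows are
-- empty, so 'arr[i][0] = 1' raises IndexError
def Pre_solution (n : Int) (m : Int) : Prop := 1 ≤ n ∨ m ≤ 0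
instance (n : Int) (m : Int) : Decidable (Pre_solution n m) := by unfold Pre_solution; infer_instance

def pvWitness_solution : Int × Int := (3, 10)

def Spec_solution (n : Int) (m : Int) (out : Int) : Prop := out = solution_alt n m
instance (n : Int) (m : Int) (out : Int) : Decidable (Spec_solution n m out) := by unfold Spec_solution; infer_instance

-- ===== CLAIM (what is proved, stated in full; the proofs are below) =====
def Claim_equal_solution : Prop := ∀ (n : Int) (m : Int), Dom_solution n m → Pre_solution n m → Spec_solution n m (solution n m)

-- ===== LEMMAS AND PROOFS =====
-- the shared mathematical description: col i j is the value A stores in arr[j][i] and B keeps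
-- in its rolling column at step i; both ports are reduced to it

def colStep (prev : ℕ → Int) (t : ℕ) : ℕ → Int
  | 0 => 0
  | j+1 => if t ≤ j+1 then (if (j+1) % 2 = 0 then prev ((j+1)/2) else 0) + colStep prev t j else 0

def col : ℕ → ℕ → Int
  | 0 => fun j => if 1 ≤ j then (1:Int) else 0
  | i+1 => colStep (col i) (2^(i+1))

lemma colStep_sum (prev : ℕ → Int) (q : ℕ) (hq : 1 ≤ q) (j : ℕ) :
    colStep prev (2*q) j = if 2*q ≤ j then ∑ u ∈ Finset.Icc q (j/2), prev u else 0 := by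
  induction j with
  | zero =>
    rw [colStep, if_neg (by omega)]
  | succ j ih =>
    by_cases h : 2*q ≤ j+1
    · rw [colStep, if_pos h, ih, if_pos h]
      by_cases h2 : 2*q ≤ j
      · rw [if_pos h2]
        by_cases he : (j+1) % 2 = 0
        · rw [if_pos he]
          have hj2 : (j+1)/2 = j/2 + 1 := by omega
          rw [hj2, Finset.sum_Icc_succ_top (by omega)]
          ring
        · rw [if_neg he]
          have hj2 : (j+1)/2 = j/2 := by omega
          rw [hj2]; ring
      · rw [if_neg h2, if_pos (by omega : (j+1) % 2 = 0)]
        have h3 : (j+1)/2 = q := by omega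
        rw [h3]
        simp
    · rw [colStep, if_neg h, if_neg h]

lemma col_zero_of_lt (i j : ℕ) (h : j < 2^i) : col i j = 0 := by
  cases i with
  | zero => interval_cases j; simp [col]
  | succ i =>
    show colStep (col i) (2^(i+1)) j = 0
    induction j with
    | zero => rfl
    | succ j ihj => rw [colStep, if_neg (by omega)]

lemma getD_map_range' {α : Type} (n j : ℕ) (f : ℕ → α) (d : α) (h : j < n) :
    ((List.range n).map f).getD j d = f j := by
  rw [List.getD_eq_getElem?_getD, List.getElem?_map, List.getElem?_range h]
  rfl

lemma arr_getD_toArray {α : Type} (xs : List α) (n : ℕ) (d : α) (h : n < xs.length) :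
    (xs.toArray).getD n d = xs.getD n d := by
  simp [Array.getD, h, List.getD_eq_getElem?_getD]

lemma prefix_fold_nat (f : ℕ → Int) (c : ℕ) :
    (List.range c).foldl
      (fun (st : Array Int × Int) k => (st.1.push (st.2 + f k), st.2 + f k)) (#[], 0)
      = (((List.range c).map (fun k => ∑ u ∈ Finset.range (k+1), f u)).toArray,
         ∑ u ∈ Finset.range c, f u) := by
  induction c with
  | zero => simp
  | succ c ih =>
    rw [List.range_succ, List.foldl_append, ih]
    simp [Finset.sum_range_succ, List.push_toArray]

lemma prev0_eq (M : ℕ) :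
    ([0] ++ PySem.List.pyRepeat [1] (M:Int)) = (List.range (M+1)).map (col 0) := by
  rw [PySem.List.pyRepeat_singleton]
  simp only [Int.toNat_natCast]
  apply List.ext_getElem (by simp)
  intro k h1 h2
  simp only [List.getElem_map, List.getElem_range]
  cases k with
  | zero => simp [col]
  | succ k =>
    simp only [List.getElem_append, List.getElem_replicate]
    rw [dif_neg (by simp)]
    simp [col]

lemma bStep (M i0 : ℕ) (hL : 2^i0 ≤ M) :
    bCur (M:Int) (((2^i0:ℕ):Int)) (bPrefix (M:Int) (((2^i0:ℕ)):Int) (((List.range (M+1)).map (col i0)).toArray))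
      = ((List.range (M+1)).map (col (i0+1))).toArray := by
  have hm1 : ((M:Int) + 1) = ((M+1:ℕ):Int) := by push_cast; ring
  have hL1 : 1 ≤ 2^i0 := Nat.one_le_two_pow
  have hP : bPrefix (M:Int) (((2^i0:ℕ)):Int) (((List.range (M+1)).map (col i0)).toArray)
      = ((List.range (M+1-2^i0)).map (fun k => ∑ u ∈ Finset.range (k+1), col i0 (2^i0+u))).toArray := by
    unfold bPrefix
    rw [hm1, PySem.List.pyRange_one]
    have hc : ((((M+1:ℕ)):Int) - ((2^i0:ℕ):Int)).toNat = M+1-2^i0 := by omega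
    rw [hc, List.foldl_map]
    rw [prefix_fold_nat (fun k => (((List.range (M+1)).map (col i0)).toArray).getD ((((2^i0:ℕ):Int)+(k:Int)).toNat) 0) (M+1-2^i0)]
    dsimp only
    refine congrArg List.toArray (List.map_congr_left (fun k hk => ?_))
    refine Finset.sum_congr rfl (fun u hu => ?_)
    have hcast : (((2^i0:ℕ):Int)+(u:Int)).toNat = 2^i0+u := by omega
    rw [hcast, arr_getD_toArray _ _ _ (by simp at hk hu ⊢; omega)]
    rw [getD_map_range' _ _ _ _ (by simp at hk hu; omega)]
  rw [hP]
  unfold bCur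
  rw [hm1, PySem.List.pyRange_zero_nat, List.map_map]
  refine congrArg List.toArray (List.map_congr_left (fun j hj => ?_))
  simp only [Function.comp]
  have hj' : j ≤ M := by simp at hj; omega
  have hfd : PySem.Int.floordiv (j:Int) 2 = ((j/2 : ℕ) : Int) := by
    exact_mod_cast PySem.Int.floordiv_natCast j 2
  rw [hfd]
  by_cases hcond : 2^(i0+1) ≤ j
  · rw [if_pos (by exact_mod_cast (by omega : (2^i0:ℕ) ≤ j/2))]
    have hidx : (((j/2:ℕ):Int) - ((2^i0:ℕ):Int)).toNat = j/2 - 2^i0 := by omega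
    rw [hidx, arr_getD_toArray _ _ _ (by simp; omega)]
    rw [getD_map_range' _ _ _ _ (by omega)]
    -- ∑ u ∈ range (j/2 - 2^i0 + 1), col i0 (2^i0 + u) = col (i0+1) j
    have hcol : col (i0+1) j = ∑ u ∈ Finset.Icc (2^i0) (j/2), col i0 u := by
      show colStep (col i0) (2^(i0+1)) j = _
      rw [show (2:ℕ)^(i0+1) = 2*2^i0 by ring]
      rw [colStep_sum _ _ hL1 j, if_pos (by omega)]
    rw [hcol, ← Finset.Ico_add_one_right_eq_Icc, Finset.sum_Ico_eq_sum_range]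
    refine Finset.sum_congr (by congr 1; omega) (fun u _ => rfl)
  · rw [if_neg (by
      intro hc
      have : (2^i0:ℕ) ≤ j/2 := by exact_mod_cast hc
      omega)]
    rw [col_zero_of_lt (i0+1) j (by omega)]

lemma altLoop_spec (M : ℕ) (c : ℕ) : ∀ (i0 : ℕ),
    altLoop (M:Int) (((List.range (M+1)).map (col i0)).toArray) ((i0:Int)+1) c
      = ((List.range M).map (fun k => col (i0+c) (k+1))).sum := by
  induction c with
  | zero =>
    intro i0
    rw [altLoop, List.toList_toArray, PySem.List.slice_from_one]
    rw [List.range_succ_eq_map, List.map_cons, List.tail_cons, List.map_map]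
    simp [Function.comp_def, Nat.succ_eq_add_one]
  | succ c ih =>
    intro i0
    rw [altLoop]
    have hlo : ((i0:Int)+1-1).toNat = i0 := by simp
    rw [hlo]
    have hcast : ((2:Int))^i0 = ((2^i0 : ℕ) : Int) := by push_cast; ring
    by_cases hM : M < 2^i0
    · rw [if_pos (by rw [hcast]; exact_mod_cast hM)]
      symm
      apply List.sum_eq_zero
      intro x hx
      simp only [List.mem_map, List.mem_range] at hx
      obtain ⟨k, hk, rfl⟩ := hx
      exact col_zero_of_lt _ _ (by
        calc k + 1 ≤ M := hk
        _ < 2^i0 := hM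
        _ ≤ 2^(i0+(c+1)) := Nat.pow_le_pow_right (by omega) (by omega))
    · rw [if_neg (by rw [hcast]; exact_mod_cast hM)]
      rw [hcast, bStep M i0 (by omega)]
      have harg : ((i0:Int)+1+1) = (((i0+1:ℕ)):Int)+1 := by push_cast; ring
      rw [harg, ih (i0+1)]
      refine congrArg _ (List.map_congr_left (fun k _ => ?_))
      congr 1
      omega

lemma solB_eq (N M : ℕ) :
    solution_alt (N:Int) (M:Int) = ((List.range M).map (fun k => col (N-1) (k+1))).sum := by
  unfold solution_alt
  rw [show ([(0:Int)] ++ PySem.List.pyRepeat [1] (M:Int)) = ([0] ++ PySem.List.pyRepeat [1] (M:Int)) from rfl, prev0_eq]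
  have hfuel : ((N:Int)-1).toNat = N-1 := by omega
  rw [hfuel]
  have h1 : (1:Int) = ((0:ℕ):Int)+1 := by norm_num
  rw [h1, altLoop_spec M (N-1) 0]
  simp

def table (M N : ℕ) (g : ℕ → ℕ → Int) : Array (Array Int) :=
  ((List.range (M+1)).map (fun j => ((List.range N).map (fun k => g j k)).toArray)).toArray

def gSpec (I : ℕ) : ℕ → ℕ → Int := fun j k => if k ≤ I then col k j else 0

def gpart (i J : ℕ) : ℕ → ℕ → Int :=
  fun j k => if k < i then col k j else if k = i ∧ j < J then col i j else 0

lemma table_congr {M N : ℕ} {g h : ℕ → ℕ → Int}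
    (hgh : ∀ j, j ≤ M → ∀ k, k < N → g j k = h j k) : table M N g = table M N h := by
  unfold table
  refine congrArg List.toArray (List.map_congr_left (fun j hj => congrArg List.toArray ?_))
  exact List.map_congr_left (fun k hk =>
    hgh j (by simpa using Nat.lt_succ_iff.mp (List.mem_range.mp hj)) k (List.mem_range.mp hk))

lemma get2_table {M N : ℕ} (g : ℕ → ℕ → Int) (j k : ℕ) (hj : j ≤ M) (hk : k < N) :
    pyGet2 (table M N g) (j : Int) (k : Int) = g j k := by
  unfold pyGet2 table
  simp only [Int.toNat_natCast]
  rw [arr_getD_toArray _ j #[] (by simpa using Nat.lt_succ_iff.mpr hj)]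
  rw [getD_map_range' _ _ _ _ (Nat.lt_succ_iff.mpr hj)]
  rw [arr_getD_toArray _ k 0 (by simpa using hk)]
  rw [getD_map_range' _ _ _ _ hk]

lemma set2_table {M N : ℕ} (g : ℕ → ℕ → Int) (j k : ℕ) (v : Int) (hj : j ≤ M) (_hk : k < N) :
    pySet2 (table M N g) (j : Int) (k : Int) v
      = table M N (fun j' k' => if j' = j ∧ k' = k then v else g j' k') := by
  unfold pySet2 table
  simp only [Int.toNat_natCast]
  apply Array.ext
  · simp
  · intro p h1 h2
    rw [Array.getElem_modify]
    simp only [List.getElem_toArray, List.getElem_map, List.getElem_range]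
    by_cases hpj : j = p
    · rw [if_pos hpj]
      subst hpj
      apply Array.ext
      · simp
      · intro q hq1 hq2
        by_cases hkq : k = q
        · simp [hkq]
        · simp [hkq, Ne.symm hkq]
    · rw [if_neg hpj]
      refine congrArg List.toArray (List.map_congr_left (fun q _ => ?_))
      rw [if_neg (by rintro ⟨rfl, _⟩; exact hpj rfl)]

lemma col_succ_eq (i : ℕ) (hi : 1 ≤ i) : col i = colStep (col (i-1)) (2^i) := by
  cases i with
  | zero => omega
  | succ i => rfl

lemma col_rec (I J : ℕ) (hI : 1 ≤ I) (hJ : 2^I ≤ J) :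
    col I J = (if J % 2 = 0 then col (I-1) (J/2) else 0) + col I (J-1) := by
  obtain ⟨p, rfl⟩ : ∃ p, J = p + 1 := ⟨J-1, by have := Nat.one_le_two_pow (n := I); omega⟩
  rw [col_succ_eq I hI, colStep, if_pos hJ]
  simp

lemma innerAux (M N I : ℕ) (hI : 1 ≤ I) (hIN : I < N) :
    ∀ (c : ℕ), 2^I + c ≤ M+1 ∨ c = 0 →
    (List.range c).foldl
      (fun arr (k:ℕ) =>
        if PySem.Int.mod (((2^I:ℕ):Int) + (k:Int)) 2 = 0 then
          pySet2 arr (((2^I:ℕ):Int) + (k:Int)) (I:Int)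
            (pyGet2 arr (PySem.Int.floordiv (((2^I:ℕ):Int) + (k:Int)) 2) ((I:Int)-1)
              + pyGet2 arr ((((2^I:ℕ):Int) + (k:Int))-1) (I:Int))
        else
          pySet2 arr (((2^I:ℕ):Int) + (k:Int)) (I:Int)
            (pyGet2 arr ((((2^I:ℕ):Int) + (k:Int))-1) (I:Int)))
      (table M N (gpart I (2^I)))
    = table M N (gpart I (2^I + c)) := by
  intro c
  induction c with
  | zero => intro _; rfl
  | succ c ih =>
    intro hc
    have hc' : 2^I + (c+1) ≤ M + 1 := by rcases hc with h | h; exact h; omega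
    have hJM : 2^I + c ≤ M := by omega
    have hJ2 : 2 ≤ 2^I := by
      calc 2 = 2^1 := by norm_num
      _ ≤ 2^I := Nat.pow_le_pow_right (by omega) hI
    rw [List.range_succ, List.foldl_append, ih (by omega)]
    simp only [List.foldl_cons, List.foldl_nil]
    have hJcast : ((2^I:ℕ):Int) + (c:Int) = ((2^I + c : ℕ):Int) := by push_cast; ring
    rw [hJcast]
    set J := 2^I + c with hJdef
    have hmod : PySem.Int.mod ((J:ℕ):Int) 2 = ((J % 2 : ℕ) : Int) := by
      exact_mod_cast PySem.Int.mod_natCast J 2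
    have hfd : PySem.Int.floordiv ((J:ℕ):Int) 2 = ((J/2 : ℕ) : Int) := by
      exact_mod_cast PySem.Int.floordiv_natCast J 2
    have hJ1 : ((J:ℕ):Int) - 1 = ((J - 1 : ℕ):Int) := by omega
    have hI1 : ((I:ℕ):Int) - 1 = ((I - 1 : ℕ):Int) := by omega
    have hget1 : pyGet2 (table M N (gpart I J)) ((J/2 : ℕ):Int) ((I-1 : ℕ):Int)
        = col (I-1) (J/2) := by
      rw [get2_table _ _ _ (by omega) (by omega)]
      unfold gpart
      rw [if_pos (by omega)]
    have hget2 : pyGet2 (table M N (gpart I J)) ((J-1 : ℕ):Int) ((I : ℕ):Int)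
        = col I (J-1) := by
      rw [get2_table _ _ _ (by omega) hIN]
      unfold gpart
      rw [if_neg (by omega), if_pos ⟨rfl, by omega⟩]
    have hcell : ∀ (v : Int), v = col I J →
        pySet2 (table M N (gpart I J)) ((J:ℕ):Int) ((I:ℕ):Int) v
          = table M N (gpart I (J+1)) := by
      intro v hv
      rw [set2_table _ _ _ _ (by omega) hIN]
      apply table_congr
      intro j' hj' k' hk'
      by_cases h1 : j' = J ∧ k' = I
      · obtain ⟨rfl, rfl⟩ := h1
        rw [if_pos ⟨rfl, rfl⟩]
        unfold gpart
        rw [if_neg (by omega), if_pos ⟨rfl, by omega⟩, hv]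
      · rw [if_neg h1]
        unfold gpart
        by_cases h2 : k' < I
        · rw [if_pos h2, if_pos h2]
        · rw [if_neg h2, if_neg h2]
          by_cases h3 : k' = I
          · subst h3
            have hne : j' ≠ J := fun hh => h1 ⟨hh, rfl⟩
            by_cases h4 : j' < J
            · rw [if_pos ⟨rfl, h4⟩, if_pos ⟨rfl, by omega⟩]
            · rw [if_neg (fun hh => h4 hh.2), if_neg (by rintro ⟨_, hh⟩; omega)]
          · rw [if_neg (fun hh => h3 hh.1), if_neg (fun hh => h3 hh.1)]
    rw [hmod]
    by_cases hpar : J % 2 = 0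
    · rw [if_pos (by exact_mod_cast hpar)]
      rw [hfd, hI1, hJ1, hget1, hget2]
      rw [hcell _ (by rw [col_rec I J hI (by omega), if_pos hpar])]
      have : J + 1 = 2^I + (c+1) := by omega
      rw [this]
    · rw [if_neg (by
        intro hh
        exact hpar (by exact_mod_cast hh))]
      rw [hJ1, hget2]
      rw [hcell _ (by rw [col_rec I J hI (by omega), if_neg hpar]; ring)]
      have : J + 1 = 2^I + (c+1) := by omega
      rw [this]

lemma innerFold (M N I : ℕ) (hI : 1 ≤ I) (hIN : I < N) :
    (PySem.List.pyRange ((2:Int)^((I:Int)).toNat) (((M+1:ℕ)):Int) 1).foldl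
      (fun arr j =>
        if PySem.Int.mod j 2 = 0 then
          pySet2 arr j (I:Int)
            (pyGet2 arr (PySem.Int.floordiv j 2) ((I:Int)-1) + pyGet2 arr (j-1) (I:Int))
        else
          pySet2 arr j (I:Int) (pyGet2 arr (j-1) (I:Int)))
      (table M N (gSpec (I-1)))
    = table M N (gSpec I) := by
  have htn : ((I:Int)).toNat = I := by simp
  have hpow : ((2:Int))^I = ((2^I : ℕ):Int) := by push_cast; ring
  rw [htn, hpow, PySem.List.pyRange_one, List.foldl_map]
  have hcnt : ((((M+1:ℕ)):Int) - ((2^I:ℕ):Int)).toNat = M + 1 - 2^I := by omega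
  rw [hcnt]
  have hinit : table M N (gSpec (I-1)) = table M N (gpart I (2^I)) := by
    apply table_congr
    intro j hj k hk
    unfold gSpec gpart
    by_cases h2 : k < I
    · rw [if_pos (by omega), if_pos h2]
    · rw [if_neg (by omega), if_neg h2]
      by_cases h3 : k = I ∧ j < 2^I
      · rw [if_pos h3, col_zero_of_lt I j h3.2]
      · rw [if_neg h3]
  rw [hinit, innerAux M N I hI hIN (M+1-2^I) (by omega)]
  apply table_congr
  intro j hj k hk
  unfold gSpec gpart
  by_cases h2 : k < I
  · rw [if_pos h2, if_pos (by omega)]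
  · rw [if_neg h2]
    by_cases h3 : k = I
    · by_cases h4 : j < 2^I + (M+1-2^I)
      · rw [if_pos ⟨h3, h4⟩, if_pos (by omega)]
        rw [h3]
      · rw [if_neg (by rintro ⟨_, hh⟩; omega), if_pos (by omega)]
        rw [h3, col_zero_of_lt I j (by omega)]
    · rw [if_neg (fun hh => h3 hh.1), if_neg (by omega)]

lemma init0 (M N : ℕ) :
    ((PySem.List.pyRange 0 (((M+1:ℕ)):Int) 1).map
      (fun _ => ((PySem.List.pyRange 0 (N:Int) 1).map (fun _ => (0:Int))).toArray)).toArray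
      = table M N (fun _ _ => 0) := by
  unfold table
  rw [PySem.List.pyRange_zero_nat, PySem.List.pyRange_zero_nat]
  simp [List.map_const', Function.comp_def]

lemma firstLoopAux (M N : ℕ) (hN : 1 ≤ N) : ∀ c, c ≤ M →
    (List.range c).foldl (fun arr (k:ℕ) => pySet2 arr (1 + (k:Int)) 0 1)
      (table M N (fun _ _ => 0))
      = table M N (fun j k => if k = 0 ∧ 1 ≤ j ∧ j ≤ c then 1 else 0) := by
  intro c
  induction c with
  | zero =>
    intro _
    apply table_congr
    intro j hj k hk
    rw [if_neg (by omega)]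
  | succ c ih =>
    intro hc
    rw [List.range_succ, List.foldl_append, ih (by omega)]
    simp only [List.foldl_cons, List.foldl_nil]
    have hcast : (1:Int) + (c:Int) = ((1+c:ℕ):Int) := by push_cast; ring
    have h0 : (0:Int) = ((0:ℕ):Int) := rfl
    rw [hcast, h0, set2_table _ _ _ _ (by omega) (by omega)]
    apply table_congr
    intro j hj k hk
    split_ifs <;> omega

lemma outerAux (M N : ℕ) (hN : 1 ≤ N) : ∀ d, d ≤ N - 1 →
    (List.range d).foldl
      (fun arr (k:ℕ) =>
        (PySem.List.pyRange ((2:Int)^((1 + (k:Int))).toNat) (((M+1:ℕ)):Int) 1).foldl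
          (fun arr j =>
            if PySem.Int.mod j 2 = 0 then
              pySet2 arr j (1 + (k:Int))
                (pyGet2 arr (PySem.Int.floordiv j 2) ((1 + (k:Int))-1)
                  + pyGet2 arr (j-1) (1 + (k:Int)))
            else
              pySet2 arr j (1 + (k:Int)) (pyGet2 arr (j-1) (1 + (k:Int)))) arr)
      (table M N (gSpec 0))
      = table M N (gSpec d) := by
  intro d
  induction d with
  | zero => intro _; rfl
  | succ d ih =>
    intro hd
    rw [List.range_succ, List.foldl_append, ih (by omega)]
    simp only [List.foldl_cons, List.foldl_nil]
    have hcast : (1:Int) + (d:Int) = (((1+d:ℕ)):Int) := by push_cast; ring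
    rw [hcast]
    have hpre : gSpec d = gSpec ((1+d) - 1) := by
      have : (1+d) - 1 = d := by omega
      rw [this]
    rw [hpre, innerFold M N (1+d) (by omega) (by omega)]
    have : 1+d = d+1 := by omega
    rw [this]

lemma solA_eq (N M : ℕ) (hN : 1 ≤ N) :
    solution (N:Int) (M:Int) = ((List.range M).map (fun k => col (N-1) (k+1))).sum := by
  simp only [solution]
  have hm1 : ((M:Int)+1) = (((M+1:ℕ)):Int) := by push_cast; ring
  rw [hm1]
  rw [PySem.List.pyRange_one 1 (((M+1:ℕ)):Int), PySem.List.pyRange_one 1 (N:Int)]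
  have hc1 : (((((M+1:ℕ)):Int)) - 1).toNat = M := by omega
  have hc2 : (((N:Int)) - 1).toNat = N - 1 := by omega
  rw [hc1, hc2]
  simp only [List.foldl_map]
  rw [init0, firstLoopAux M N hN M le_rfl]
  have hg0 : table M N (fun j k => if k = 0 ∧ 1 ≤ j ∧ j ≤ M then 1 else 0)
      = table M N (gSpec 0) := by
    apply table_congr
    intro j hj k hk
    unfold gSpec
    by_cases h1 : k = 0
    · subst h1
      rw [if_pos le_rfl]
      show _ = col 0 j
      by_cases h2 : 1 ≤ j
      · rw [if_pos (by omega)]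
        simp [col, h2]
      · rw [if_neg (by omega)]
        simp [col, h2]
    · rw [if_neg (by omega), if_neg (by omega)]
  rw [hg0, outerAux M N hN (N-1) le_rfl]
  rw [PySem.List.foldl_add]
  rw [zero_add]
  refine congrArg _ (List.map_congr_left (fun k hk => ?_))
  have hk' : k < M := List.mem_range.mp hk
  have hcast : (1:Int) + (k:Int) = (((1+k:ℕ)):Int) := by push_cast; ring
  have hncast : ((N:Int)) - 1 = (((N-1:ℕ)):Int) := by omega
  rw [hcast, hncast, get2_table _ _ _ (by omega) (by omega)]
  unfold gSpec
  rw [if_pos le_rfl]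
  have : 1 + k = k + 1 := by omega
  rw [this]

theorem main_eq (n m : Int) (hpre : 1 ≤ n ∨ m ≤ 0) : solution n m = solution_alt n m := by
  by_cases hm : m ≤ 0
  · have hA : solution n m = 0 := by
      simp only [solution]
      rw [PySem.List.pyRange_one_eq_nil (by omega : m + 1 ≤ 1)]
      simp
    have hB : solution_alt n m = 0 := by
      unfold solution_alt
      rw [PySem.List.pyRepeat_singleton, (by omega : m.toNat = 0)]
      cases hf : (n-1).toNat with
      | zero =>
        rw [altLoop]
        simp [PySem.List.slice_from_one]
      | succ f =>
        rw [altLoop]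
        simp only [List.replicate]
        rw [if_pos (by
          show m < (2:Int)^((1:Int)-1).toNat
          norm_num
          omega)]
    rw [hA, hB]
  · have hm1 : 1 ≤ m := by omega
    have hn1 : 1 ≤ n := by rcases hpre with h | h; exact h; omega
    obtain ⟨M, rfl⟩ : ∃ M:ℕ, m = (M:Int) := ⟨m.toNat, (Int.toNat_of_nonneg (by omega)).symm⟩
    obtain ⟨N, rfl⟩ : ∃ N:ℕ, n = (N:Int) := ⟨n.toNat, (Int.toNat_of_nonneg (by omega)).symm⟩
    rw [solA_eq N M (by exact_mod_cast hn1), solB_eq N M]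

-- ===== VERDICT (by name: the statement is the Claim_ definition above) =====
theorem solution_spec : Claim_equal_solution := by
  intro n m _ hpre
  unfold Pre_solution at hpre
  unfold Spec_solution
  exact main_eq n m hpre
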